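-- pv_equiv track=rewrite | github.com/dim272/gadget_price_0.2 | parsing.py | __price_parsing_sorter
-- ===== SOURCE A (Python) =====
-- def __price_parsing_sorter(list_):
--     new_data = {}
--     for one_dict in list_:
--         for key in one_dict:
--             try:
--                 val = new_data[key]
--                 new_data[key] = val + [one_dict[key]]
--             except KeyError:
--                 new_data[key] = [one_dict[key]]
--
--     result = {}
--     for key in new_data:
--         price = max(new_data[key])
--         result[key] = price
--
--     return result
-- ===== SOURCE B (Python) =====
-- def __price_parsing_sorter(list_):
--     keys = dict.fromkeys(key for one_dict in list_ for key in one_dict)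
--     return {key: max(d[key] for d in list_ if key in d) for key in keys}
-- ===== Notes on version B (the rewrite author's own statement) =====
-- stated objective: simpler
-- what changed: Instead of accumulating every value into per-key lists and then taking max of each list, B first builds the ordered set of keys with dict.fromkeys and computes each key's max by scanning the dict list directly in a comprehension.
import Mathlib
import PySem

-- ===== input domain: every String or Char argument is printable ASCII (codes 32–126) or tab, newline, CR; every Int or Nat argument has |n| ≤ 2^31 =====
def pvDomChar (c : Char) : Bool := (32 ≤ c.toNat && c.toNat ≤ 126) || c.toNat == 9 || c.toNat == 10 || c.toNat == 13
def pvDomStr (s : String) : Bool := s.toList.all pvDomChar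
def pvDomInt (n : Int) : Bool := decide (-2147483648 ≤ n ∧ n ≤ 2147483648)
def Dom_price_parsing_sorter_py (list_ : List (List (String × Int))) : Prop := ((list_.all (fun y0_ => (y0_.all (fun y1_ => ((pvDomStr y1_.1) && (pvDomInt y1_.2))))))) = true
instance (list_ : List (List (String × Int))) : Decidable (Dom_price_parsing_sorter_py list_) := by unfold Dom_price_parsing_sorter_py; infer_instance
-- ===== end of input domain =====

-- B replaces A's accumulate-values-into-per-key-lists-then-max by an ordered key set plus a per-key max scan; objective: simpler.
-- Each inner List (String × Int) encodes a Python dict: iteration = its distinct keys in order, lookup = first match.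

-- d[k] on a dict encoded as an association list: first match (shared dict-lookup primitive of both ports)
def pvLookup (d : List (String × Int)) (k : String) : Option Int :=
  (d.find? (fun kv => kv.1 == k)).map Prod.snd

-- ===== PORT A =====
-- max(vs); the [] case is unreachable (every accumulated list is nonempty)
def pvMax (l : List Int) : Int :=
  match l with
  | [] => 0
  | x :: t => t.foldl max x

def price_parsing_sorter_py (list_ : List (List (String × Int))) : List (String × Int) :=
  -- new_data: for one_dict in list_: for key in one_dict: append one_dict[key] to new_data's list at key
  let new_data : PySem.Dict String (List Int) :=
    list_.foldl (fun nd one_dict =>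
      (PySem.List.dedup (one_dict.map Prod.fst)).foldl (fun nd key =>
        nd.modify key [] (fun vs => vs ++ [(pvLookup one_dict key).getD 0])) nd)
      PySem.Dict.empty
  -- result: for key in new_data: result[key] = max(new_data[key])
  let result : PySem.Dict String Int :=
    new_data.items.foldl (fun r kv => r.insert kv.1 (pvMax kv.2)) PySem.Dict.empty
  result.items

-- ===== PORT B =====
def price_parsing_sorter_py_alt (list_ : List (List (String × Int))) : List (String × Int) :=
  let keys := PySem.List.dedup (list_.flatMap (fun one_dict => PySem.List.dedup (one_dict.map Prod.fst)))
  keys.map (fun key =>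
    (key, (PySem.List.max? (list_.filterMap (fun d => pvLookup d key)) (fun x => x)).getD 0))

-- ===== PRECONDITION & SPEC =====
def Spec_price_parsing_sorter_py (list_ : List (List (String × Int))) (out : List (String × Int)) : Prop := out = price_parsing_sorter_py_alt list_
instance (list_ : List (List (String × Int))) (out : List (String × Int)) : Decidable (Spec_price_parsing_sorter_py list_ out) := by unfold Spec_price_parsing_sorter_py; infer_instance

-- ===== CLAIM (what is proved, stated in full; the proofs are below) =====
def Claim_equal_price_parsing_sorter_py : Prop := ∀ (list_ : List (List (String × Int))), Dom_price_parsing_sorter_py list_ → Spec_price_parsing_sorter_py list_ (price_parsing_sorter_py list_)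

-- ===== LEMMAS AND PROOFS =====

def pvPairs (d : List (String × Int)) : List (String × Int) :=
  (PySem.List.dedup (d.map Prod.fst)).map (fun k => (k, (pvLookup d k).getD 0))

lemma foldl_nested (list_ : List (List (String × Int))) (init : PySem.Dict String (List Int)) :
    list_.foldl (fun nd one_dict =>
      (PySem.List.dedup (one_dict.map Prod.fst)).foldl (fun nd key =>
        nd.modify key [] (fun vs => vs ++ [(pvLookup one_dict key).getD 0])) nd) init
    = (list_.flatMap pvPairs).foldl (fun nd p => nd.modify p.1 [] (fun vs => vs ++ [p.2])) init := by
  induction list_ generalizing init with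
  | nil => rfl
  | cons d t ih =>
    simp only [List.foldl_cons, List.flatMap_cons, List.foldl_append, ih, pvPairs, List.foldl_map]

lemma filter_beq_nodup {α : Type} [DecidableEq α] (l : List α) (hnd : l.Nodup) (k : α) :
    l.filter (fun x => x == k) = if k ∈ l then [k] else [] := by
  induction l with
  | nil => simp
  | cons x t ih =>
    simp only [List.nodup_cons] at hnd
    by_cases hx : x = k
    · subst hx
      simp [hnd.1, ih hnd.2]
    · simp [hx, ih hnd.2, List.mem_cons, Ne.symm hx]

lemma pvLookup_eq_none (d : List (String × Int)) (k : String) :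
    pvLookup d k = none ↔ k ∉ d.map Prod.fst := by
  simp only [pvLookup, Option.map_eq_none_iff, List.find?_eq_none, beq_iff_eq]
  constructor
  · intro h hk
    obtain ⟨p, hp, hfst⟩ := List.mem_map.mp hk
    exact h p hp hfst
  · intro h p hp ha
    exact h (List.mem_map.mpr ⟨p, hp, ha⟩)

lemma pvPairs_filter (d : List (String × Int)) (k : String) :
    ((pvPairs d).filter (fun p => p.1 == k)).map (fun p => p.2) = (pvLookup d k).toList := by
  have h1 : (pvPairs d).filter (fun p => p.1 == k)
      = ((PySem.List.dedup (d.map Prod.fst)).filter (fun x => x == k)).map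
          (fun k' => (k', (pvLookup d k').getD 0)) := by
    simp only [pvPairs, List.filter_map]
    exact congrArg _ (List.filter_congr (fun x _ => rfl))
  rw [h1, filter_beq_nodup _ (PySem.List.nodup_dedup _) k]
  by_cases hk : k ∈ d.map Prod.fst
  · have hne : pvLookup d k ≠ none := fun h => (pvLookup_eq_none d k).mp h hk
    obtain ⟨v, hv⟩ := Option.ne_none_iff_exists'.mp hne
    simp [hk, hv]
  · simp [hk, (pvLookup_eq_none d k).mpr hk]

lemma vals_eq (list_ : List (List (String × Int))) (k : String) :
    (((list_.flatMap pvPairs).filter (fun p => p.1 == k)).map (fun p => p.2))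
    = list_.filterMap (fun d => pvLookup d k) := by
  induction list_ with
  | nil => rfl
  | cons d t ih =>
    simp only [List.flatMap_cons, List.filter_append, List.map_append, ih, List.filterMap_cons]
    rw [pvPairs_filter]
    cases pvLookup d k <;> simp

lemma ports_eq (list_ : List (List (String × Int))) :
    price_parsing_sorter_py list_ = price_parsing_sorter_py_alt list_ := by
  unfold price_parsing_sorter_py price_parsing_sorter_py_alt
  rw [foldl_nested]
  set qs := list_.flatMap pvPairs with hqs
  set nd := qs.foldl (fun nd p => nd.modify p.1 [] (fun vs => vs ++ [p.2])) PySem.Dict.empty with hnd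
  have hkeys : nd.keys = PySem.Set.ofList (qs.map (fun p => p.1)) := by
    rw [hnd, PySem.Dict.keys_foldl_modify_key qs (fun p => p.1) [] (fun _ p => fun vs => vs ++ [p.2])]
    rfl
  have hqfst : qs.map (fun p => p.1) = list_.flatMap (fun d => PySem.List.dedup (d.map Prod.fst)) := by
    simp [hqs, List.map_flatMap, pvPairs, List.map_map, Function.comp_def]
  have hnodup : nd.keys.Nodup := by
    rw [hnd]
    exact PySem.Dict.nodup_keys_foldl_modify_key qs (fun p => p.1) [] (fun _ p => fun vs => vs ++ [p.2]) _ (by simp)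
  have hgetD : ∀ k, nd.getD k [] = list_.filterMap (fun d => pvLookup d k) := by
    intro k
    rw [hnd, PySem.Dict.getD_foldl_modify_append qs PySem.Dict.empty k]
    have h0 : (PySem.Dict.empty : PySem.Dict String (List Int)).getD k [] = [] := by rfl
    rw [h0, List.nil_append]
    exact vals_eq list_ k
  have hres : (nd.items.foldl (fun r kv => r.insert kv.1 (pvMax kv.2)) PySem.Dict.empty).items
      = nd.items.map (fun kv => (kv.1, pvMax kv.2)) := by
    rw [PySem.Dict.items_foldl_insert_fresh nd.items (fun kv => kv.1) (fun kv => pvMax kv.2)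
        PySem.Dict.empty (fun a _ => by simp) (by simpa [PySem.Dict.keys] using hnodup)]
    rfl
  rw [hres, PySem.Dict.items_eq_map_keys nd hnodup [], List.map_map]
  rw [hkeys, hqfst]
  apply List.map_congr_left
  intro k hk
  simp only [Function.comp]
  have hvals := hgetD k
  have hne : list_.filterMap (fun d => pvLookup d k) ≠ [] := by
    rw [PySem.Set.mem_ofList] at hk
    obtain ⟨d, hd, hkd⟩ := List.mem_flatMap.mp hk
    rw [PySem.List.mem_dedup] at hkd
    have : pvLookup d k ≠ none := fun h => (pvLookup_eq_none d k).mp h hkd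
    obtain ⟨v, hv⟩ := Option.ne_none_iff_exists'.mp this
    have hvmem : v ∈ list_.filterMap (fun d => pvLookup d k) := List.mem_filterMap.mpr ⟨d, hd, hv⟩
    exact fun hnil => by simp [hnil] at hvmem
  obtain ⟨x, t, hxt⟩ := List.exists_cons_of_ne_nil hne
  rw [hvals, hxt, PySem.List.max?_id_cons]
  simp [pvMax]

-- ===== VERDICT (by name: the statement is the Claim_ definition above) =====
theorem price_parsing_sorter_py_spec : Claim_equal_price_parsing_sorter_py := by
  intro list_ _
  unfold Spec_price_parsing_sorter_py
  exact ports_eq list_
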